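-- pv_equiv track=rewrite | github.com/minh14496/python_data_structure | code_signal/alternating.py | alternatingSubarrays
-- ===== SOURCE A (Python) =====
-- def alternatingSubarrays(arr):
--     if arr:
--         streak = 1 # keep track of how long our streak is
--         answer = 1 # keep track of our answer
--         previous = arr[0] #initialize a previous tracker
--         for i in arr[1:]: # iterate through the rest of the array
--             if (i + previous) % 2 == 1: # if current and previous are alternating
--                 streak += 1 # increase the streak
--             else: #otherwise
--                 streak = 1 # reset streak
--             answer += streak # we add our streak to answer
--             previous = i # advance previous
--
--         return answer
--     else:
--         return 0
-- ===== SOURCE B (Python) =====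
-- def alternatingSubarrays(arr):
--     # Phase 1: split arr into maximal runs of alternating parity, collecting run lengths.
--     runs = []
--     cur = 0
--     prev_parity = None
--     for x in arr:
--         p = x % 2
--         if prev_parity is not None and p != prev_parity:
--             cur += 1
--         else:
--             if cur:
--                 runs.append(cur)
--             cur = 1
--         prev_parity = p
--     if cur:
--         runs.append(cur)
--     # Phase 2: each run of length L contributes L*(L+1)//2 alternating subarrays.
--     return sum(L * (L + 1) // 2 for L in runs)
-- ===== Notes on version B (the rewrite author's own statement) =====
-- stated objective: alternative
-- what changed: Instead of accumulating a per-element streak counter into the answer, B first splits the array into maximal alternating-parity runs and then sums the closed-form contribution L*(L+1)//2 of each run.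
import Mathlib
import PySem

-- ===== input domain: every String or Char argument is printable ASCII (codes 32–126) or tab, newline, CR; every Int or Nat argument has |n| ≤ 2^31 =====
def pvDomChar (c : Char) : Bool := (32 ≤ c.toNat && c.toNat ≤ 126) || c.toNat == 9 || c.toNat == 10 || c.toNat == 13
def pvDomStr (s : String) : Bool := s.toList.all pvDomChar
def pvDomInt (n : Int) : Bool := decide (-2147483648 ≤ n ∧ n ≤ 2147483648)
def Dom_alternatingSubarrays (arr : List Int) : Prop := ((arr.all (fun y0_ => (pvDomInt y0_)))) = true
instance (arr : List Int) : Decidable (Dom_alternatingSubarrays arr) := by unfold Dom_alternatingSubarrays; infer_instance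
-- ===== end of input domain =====

-- B replaces A's per-element streak accumulation by a two-phase run-splitting algorithm
-- (collect maximal alternating-parity run lengths, then sum the closed form L*(L+1)//2 per run);
-- same cost, alternative decomposition.


-- ===== PORT A =====
-- literal port of A: state (streak, answer, previous), fold over arr[1:]
def alternatingSubarrays (arr : List Int) : Int :=
  match arr with
  | [] => 0
  | a0 :: rest =>
    let st := rest.foldl (fun (st : Int × Int × Int) i =>
      let streak := if PySem.Int.mod (i + st.2.2) 2 = 1 then st.1 + 1 else 1
      (streak, st.2.1 + streak, i)) (1, 1, a0)
    st.2.1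

-- ===== PORT B =====
-- phase 1 of Source B: fold state (runs, cur, prev_parity)
def altRunsStep (st : List Int × Int × Option Int) (x : Int) : List Int × Int × Option Int :=
  let p := PySem.Int.mod x 2
  if (match st.2.2 with | some q => decide (p ≠ q) | none => false) = true then
    (st.1, st.2.1 + 1, some p)
  else
    ((if st.2.1 ≠ 0 then st.1 ++ [st.2.1] else st.1), 1, some p)

def alternatingSubarrays_alt (arr : List Int) : Int :=
  let st := arr.foldl altRunsStep ([], 0, none)
  let runs := if st.2.1 ≠ 0 then st.1 ++ [st.2.1] else st.1
  runs.foldl (fun acc L => acc + PySem.Int.floordiv (L * (L + 1)) 2) 0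

-- ===== PRECONDITION & SPEC =====
def Spec_alternatingSubarrays (arr : List Int) (out : Int) : Prop := out = alternatingSubarrays_alt arr
instance (arr : List Int) (out : Int) : Decidable (Spec_alternatingSubarrays arr out) := by unfold Spec_alternatingSubarrays; infer_instance

-- ===== CLAIM (what is proved, stated in full; the proofs are below) =====
def Claim_equal_alternatingSubarrays : Prop := ∀ (arr : List Int), Dom_alternatingSubarrays arr → Spec_alternatingSubarrays arr (alternatingSubarrays arr)

-- ===== LEMMAS AND PROOFS =====

def pvTri (L : Int) : Int := PySem.Int.floordiv (L * (L + 1)) 2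

lemma pvTri_eq (L : Int) : pvTri L = L * (L + 1) / 2 := by
  unfold pvTri; rw [PySem.Int.floordiv_eq_ediv_of_pos (by norm_num)]

lemma pvTri_succ (s : Int) : pvTri (s + 1) = pvTri s + (s + 1) := by
  unfold pvTri
  have h : (s + 1) * (s + 1 + 1) = s * (s + 1) + (s + 1) * 2 := by ring
  rw [h, PySem.Int.floordiv_eq_ediv_of_pos (by norm_num),
      PySem.Int.floordiv_eq_ediv_of_pos (by norm_num),
      Int.add_mul_ediv_right _ _ (by norm_num)]

lemma pvTri_one : pvTri 1 = 1 := by decide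

lemma pvSum_append (R : List Int) (a L : Int) :
    (R ++ [L]).foldl (fun acc L => acc + PySem.Int.floordiv (L * (L + 1)) 2) a
      = R.foldl (fun acc L => acc + PySem.Int.floordiv (L * (L + 1)) 2) a + pvTri L := by
  simp [List.foldl_append, pvTri]

-- parity-test equivalence: (i + p) % 2 == 1  iff  i % 2 != p % 2
lemma pvAltCond (i p : Int) :
    (PySem.Int.mod (i + p) 2 = 1) ↔ ¬ (i % 2 = p % 2) := by
  rw [PySem.Int.mod_eq_emod_of_pos (by norm_num)]
  omega

-- main invariant: A's running answer = triangular sum of B's closed runs + the open run's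
lemma pvInvariant (rest : List Int) (s a p : Int) (R : List Int) (hs : 1 ≤ s)
    (ha : a = R.foldl (fun acc L => acc + PySem.Int.floordiv (L * (L + 1)) 2) 0 + pvTri s) :
    (rest.foldl (fun (st : Int × Int × Int) i =>
        let streak := if PySem.Int.mod (i + st.2.2) 2 = 1 then st.1 + 1 else 1
        (streak, st.2.1 + streak, i)) (s, a, p)).2.1
    =
    (let st := rest.foldl altRunsStep (R, s, some (p % 2))
     let runs := if st.2.1 ≠ 0 then st.1 ++ [st.2.1] else st.1
     runs.foldl (fun acc L => acc + PySem.Int.floordiv (L * (L + 1)) 2) 0) := by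
  induction rest generalizing s a p R with
  | nil =>
    have hne : s ≠ 0 := by omega
    simp only [List.foldl_nil]
    simp [hne, ha, pvTri_eq]
  | cons x xs ih =>
    simp only [List.foldl_cons]
    by_cases hc : PySem.Int.mod (x + p) 2 = 1
    · have hcB : ¬ (x % 2 = p % 2) := (pvAltCond x p).mp hc
      have stepB : altRunsStep (R, s, some (p % 2)) x = (R, s + 1, some (x % 2)) := by
        simp [altRunsStep, hcB]
      rw [stepB]
      simp only [hc, if_true]
      exact ih (s + 1) (a + (s + 1)) x R (by omega)
        (by rw [ha, pvTri_succ s]; ring)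
    · have hcB : x % 2 = p % 2 := by
        by_contra h; exact hc ((pvAltCond x p).mpr h)
      have hne : s ≠ 0 := by omega
      have stepB : altRunsStep (R, s, some (p % 2)) x = (R ++ [s], 1, some (x % 2)) := by
        simp [altRunsStep, hcB, hne]
      rw [stepB]
      simp only [hc, if_false]
      exact ih 1 (a + 1) x (R ++ [s]) (by omega)
        (by rw [ha, pvSum_append, pvTri_one])

-- first element: B's first step from the empty state opens a run of length 1
lemma pvFirstStep (a0 : Int) :
    altRunsStep ([], 0, none) a0 = ([], 1, some (a0 % 2)) := by
  simp [altRunsStep]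

-- ===== VERDICT (by name: the statement is the Claim_ definition above) =====
theorem alternatingSubarrays_spec : Claim_equal_alternatingSubarrays := by
  intro arr _
  unfold Spec_alternatingSubarrays
  match arr with
  | [] => rfl
  | a0 :: rest =>
    show _ = alternatingSubarrays_alt (a0 :: rest)
    unfold alternatingSubarrays alternatingSubarrays_alt
    simp only [List.foldl_cons, pvFirstStep]
    exact pvInvariant rest 1 1 a0 [] (by omega) (by simp [pvTri_one])
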